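-- pv_equiv track=rewrite | github.com/jpessoa/algoritmos1-2021-1 | 1024_cripto.py | criptografia
-- ===== SOURCE A (Python) =====
-- def criptografia(w):
-- 	l = list(w)
--
-- 	# Primeira passada
-- 	for i in range(len(l)):
-- 		code = ord(l[i])
-- 		if (code >= 65 and code <= 90)  or (code >= 97 and code <= 122):
-- 			l[i] = chr(code + 3)
--
-- 	# Segunda passada
-- 	j = len(l)-1
-- 	for i in range(len(l) // 2):
-- 		temp = l[i]
-- 		l[i] = l[j]
-- 		l[j] = temp
-- 		j = j - 1
--
-- 	# Terceira passada
-- 	for i in range(len(l) // 2, len(l)):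
-- 		l[i] = chr(ord(l[i])-1)
--
-- 	return "".join(l)
-- ===== SOURCE B (Python) =====
-- def criptografia(w):
--     n = len(w)
--     h = n // 2
--     out = []
--     for i in range(n):
--         code = ord(w[n - 1 - i])
--         if 65 <= code <= 90 or 97 <= code <= 122:
--             code += 3
--         if i >= h:
--             code -= 1
--         out.append(chr(code))
--     return "".join(out)
-- ===== Notes on version B (the rewrite author's own statement) =====
-- stated objective: simpler
-- what changed: Replaces A's three mutating passes (letter shift, in-place swap reverse, second-half decrement) with a single loop that builds each output character directly from w[n-1-i] by index arithmetic, with no intermediate list mutation or reverse step.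
import Mathlib
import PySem

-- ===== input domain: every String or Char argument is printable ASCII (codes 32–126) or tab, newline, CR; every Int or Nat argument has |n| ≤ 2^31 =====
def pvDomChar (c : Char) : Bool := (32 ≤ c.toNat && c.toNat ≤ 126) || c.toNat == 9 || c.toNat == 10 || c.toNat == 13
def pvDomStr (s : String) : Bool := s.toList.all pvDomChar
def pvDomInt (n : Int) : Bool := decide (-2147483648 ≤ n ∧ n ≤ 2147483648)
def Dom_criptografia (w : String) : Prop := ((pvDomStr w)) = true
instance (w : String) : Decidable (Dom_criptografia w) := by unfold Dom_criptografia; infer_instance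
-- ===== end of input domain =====

-- B replaces A's three mutating passes (letter shift, in-place swap reverse, second-half decrement)
-- with one direct index-mapped construction out[i] = adjust(w[n-1-i]); objective: simpler decomposition.

-- ===== PORT A =====
-- shift applied by the first pass to each position
def pvShift (c : Char) : Char :=
  let code := c.toNat
  if (65 ≤ code ∧ code ≤ 90) ∨ (97 ≤ code ∧ code ≤ 122) then Char.ofNat (code + 3) else c

-- first pass: for i in range(len(l)): l[i] = shifted l[i]   (l[i] is always in range, so getD's default is never used)
def pvPass1 (l : List Char) : List Char :=
  (List.range l.length).foldl (fun acc i => acc.set i (pvShift (acc.getD i 'A'))) l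

-- second pass: the swap loop with the explicit j counter (j stays ≥ 0 whenever the body runs,
-- so Nat subtraction matches Python's int j exactly; indices are always in range)
def pvPass2 (l : List Char) : List Char :=
  ((List.range (l.length / 2)).foldl
    (fun (st : List Char × Nat) i =>
      let temp := st.1.getD i 'A'
      let a := st.1.set i (st.1.getD st.2 'A')
      (a.set st.2 temp, st.2 - 1))
    (l, l.length - 1)).1

-- third pass: for i in range(len(l)//2, len(l)): l[i] = chr(ord(l[i]) - 1)
def pvPass3 (l : List Char) : List Char :=
  (List.range' (l.length / 2) (l.length - l.length / 2)).foldl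
    (fun acc i => acc.set i (Char.ofNat ((acc.getD i 'A').toNat - 1))) l

def criptografia (w : String) : String :=
  String.mk (pvPass3 (pvPass2 (pvPass1 w.toList)))

-- ===== PORT B =====
-- single pass: out[i] built directly from w[n-1-i] (append loop over range(n) ported as map over range)
def criptografia_alt (w : String) : String :=
  let l := w.toList
  let n := l.length
  let h := n / 2
  String.mk ((List.range n).map (fun i =>
    let code := (l.getD (n - 1 - i) 'A').toNat
    let code := if (65 ≤ code ∧ code ≤ 90) ∨ (97 ≤ code ∧ code ≤ 122) then code + 3 else code
    let code := if h ≤ i then code - 1 else code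
    Char.ofNat code))

-- ===== PRECONDITION & SPEC =====
def Spec_criptografia (w : String) (out : String) : Prop := out = criptografia_alt w
instance (w : String) (out : String) : Decidable (Spec_criptografia w out) := by unfold Spec_criptografia; infer_instance

-- ===== CLAIM (what is proved, stated in full; the proofs are below) =====
def Claim_equal_criptografia : Prop := ∀ (w : String), Dom_criptografia w → Spec_criptografia w (criptografia w)

-- ===== LEMMAS AND PROOFS =====

theorem pvToNat_ofNat (m : Nat) (h : m < 55296) : (Char.ofNat m).toNat = m := by
  have hv : Nat.isValidChar m := Or.inl h
  unfold Char.ofNat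
  rw [dif_pos hv]
  rfl

-- a fold of in-range point updates over range' a k equals a mapIdx touching exactly [a, a+k)
theorem pvFoldSet (g : Char → Char) (d : Char) :
    ∀ (k a : Nat) (l : List Char), a + k ≤ l.length →
      (List.range' a k).foldl (fun acc i => acc.set i (g (acc.getD i d))) l
        = l.mapIdx (fun i c => if a ≤ i ∧ i < a + k then g c else c) := by
  intro k
  induction k with
  | zero =>
    intro a l _
    simp only [List.range'_zero, List.foldl_nil]
    apply List.ext_getElem (by simp)
    intro i h1 h2
    simp only [List.getElem_mapIdx]
    rw [if_neg (by omega)]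
  | succ k ih =>
    intro a l hlen
    rw [List.range'_concat, List.foldl_append]
    rw [ih a l (by omega)]
    have hak : a + k < l.length := by omega
    simp only [List.foldl_cons, List.foldl_nil, Nat.one_mul]
    have hv : (l.mapIdx (fun i c => if a ≤ i ∧ i < a + k then g c else c)).getD (a + k) d
        = l[a + k]'hak := by
      rw [List.getD_eq_getElem _ d (by simpa using hak), List.getElem_mapIdx, if_neg (by omega)]
    rw [hv]
    apply List.ext_getElem (by simp)
    intro i h1 h2
    have h2' : i < l.length := by simpa using h2
    rw [List.getElem_set, List.getElem_mapIdx, List.getElem_mapIdx]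
    by_cases hi : a + k = i
    · subst hi
      rw [if_pos rfl, if_pos (by omega)]
    · rw [if_neg hi]
      by_cases hcnd : a ≤ i ∧ i < a + k
      · rw [if_pos hcnd, if_pos (by omega)]
      · rw [if_neg hcnd, if_neg (by omega)]

theorem pvPass1_eq (l : List Char) : pvPass1 l = l.map pvShift := by
  unfold pvPass1
  rw [List.range_eq_range', pvFoldSet pvShift 'A' l.length 0 l (by omega)]
  apply List.ext_getElem (by simp)
  intro i h1 h2
  simp only [List.getElem_mapIdx, List.getElem_map]
  rw [if_pos (by simp at h1; omega)]

theorem pvPass3_eq (l : List Char) :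
    pvPass3 l = l.mapIdx (fun i c => if l.length / 2 ≤ i then Char.ofNat (c.toNat - 1) else c) := by
  unfold pvPass3
  rw [pvFoldSet (fun c => Char.ofNat (c.toNat - 1)) 'A' (l.length - l.length / 2) (l.length / 2) l (by omega)]
  apply List.ext_getElem (by simp)
  intro i h1 h2
  simp only [List.getElem_mapIdx]
  have h1' : i < l.length := by simpa using h1
  by_cases hc : l.length / 2 ≤ i
  · rw [if_pos ⟨hc, by omega⟩, if_pos hc]
  · rw [if_neg (by omega), if_neg hc]

-- the intermediate list of the swap loop after k iterations
def pvMix (k : Nat) (l : List Char) : List Char :=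
  (List.range l.length).map (fun t =>
    if t < k ∨ l.length - k ≤ t then l.getD (l.length - 1 - t) 'A' else l.getD t 'A')

theorem pvMix_length (k : Nat) (l : List Char) : (pvMix k l).length = l.length := by
  simp [pvMix]

theorem pvMix_getElem (k : Nat) (l : List Char) (t : Nat) (h : t < (pvMix k l).length) :
    (pvMix k l)[t] = if t < k ∨ l.length - k ≤ t then l.getD (l.length - 1 - t) 'A' else l.getD t 'A' := by
  simp [pvMix]

theorem pvSwapInv (l : List Char) :
    ∀ (k : Nat), k ≤ l.length / 2 →
      (List.range' 0 k).foldl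
        (fun (st : List Char × Nat) i =>
          let temp := st.1.getD i 'A'
          let a := st.1.set i (st.1.getD st.2 'A')
          (a.set st.2 temp, st.2 - 1))
        (l, l.length - 1)
      = (pvMix k l, l.length - 1 - k) := by
  intro k
  induction k with
  | zero =>
    intro _
    simp only [List.range'_zero, List.foldl_nil, Nat.sub_zero]
    congr 1
    apply List.ext_getElem (by simp [pvMix_length])
    intro t h1 h2
    rw [pvMix_getElem]
    rw [if_neg (by omega), List.getD_eq_getElem _ 'A' h1]
  | succ k ih =>
    intro hk
    have hn : 2 * (k + 1) ≤ l.length := by omega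
    rw [List.range'_concat, List.foldl_append, ih (by omega)]
    simp only [Nat.zero_add, Nat.one_mul, List.foldl_cons, List.foldl_nil]
    have hkl : k < l.length := by omega
    have hjl : l.length - 1 - k < l.length := by omega
    rw [Prod.mk.injEq]
    constructor
    · -- the list component
      rw [List.getD_eq_getElem _ 'A' (by rw [pvMix_length]; omega),
          List.getD_eq_getElem _ 'A' (by rw [pvMix_length]; omega)]
      rw [pvMix_getElem, pvMix_getElem]
      rw [if_neg (by omega), if_neg (by omega)]
      apply List.ext_getElem (by simp [pvMix_length])
      intro t h1 h2
      have ht : t < l.length := by simpa [pvMix_length] using h2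
      simp only [List.getElem_set]
      rw [pvMix_getElem _ _ _ (by rw [pvMix_length]; omega)]
      rw [pvMix_getElem _ _ _ (by rw [pvMix_length]; omega)]
      by_cases h1t : l.length - 1 - k = t
      · rw [if_pos h1t, if_pos (by omega)]
        have : l.length - 1 - t = k := by omega
        rw [this]
      · rw [if_neg h1t]
        by_cases h2t : k = t
        · rw [if_pos h2t, if_pos (by omega)]
          have e : l.length - 1 - k = l.length - 1 - t := by omega
          rw [e]
        · rw [if_neg h2t]
          by_cases hc : t < k ∨ l.length - k ≤ t
          · rw [if_pos hc, if_pos (by omega)]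
          · rw [if_neg hc, if_neg (by omega)]
    · omega

theorem pvPass2_eq (l : List Char) : pvPass2 l = l.reverse := by
  unfold pvPass2
  rw [List.range_eq_range', pvSwapInv l (l.length / 2) (le_refl _)]
  apply List.ext_getElem (by simp [pvMix_length])
  intro t h1 h2
  have ht : t < l.length := by simpa using h2
  rw [pvMix_getElem _ _ _ (by rw [pvMix_length]; omega), List.getElem_reverse]
  by_cases hc : t < l.length / 2 ∨ l.length - l.length / 2 ≤ t
  · rw [if_pos hc, List.getD_eq_getElem _ 'A' (by omega)]
  · rw [if_neg hc]
    have : t = l.length - 1 - t := by omega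
    rw [List.getD_eq_getElem _ 'A' (by omega)]
    congr 1

-- ===== VERDICT (by name: the statement is the Claim_ definition above) =====
theorem criptografia_spec : Claim_equal_criptografia := by
  intro w _
  unfold Spec_criptografia criptografia criptografia_alt
  rw [pvPass1_eq, pvPass2_eq, pvPass3_eq]
  congr 1
  apply List.ext_getElem (by simp)
  intro i h1 h2
  have hn : i < w.toList.length := by simpa using h1
  simp only [List.getElem_mapIdx, List.getElem_map, List.getElem_range, List.length_reverse,
    List.length_map, List.getElem_reverse]
  rw [List.getD_eq_getElem _ 'A' (by omega)]
  set c := w.toList[w.toList.length - 1 - i] with hc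
  unfold pvShift
  by_cases hlet : (65 ≤ c.toNat ∧ c.toNat ≤ 90) ∨ (97 ≤ c.toNat ∧ c.toNat ≤ 122)
  · rw [if_pos hlet, if_pos hlet]
    by_cases hh : w.toList.length / 2 ≤ i
    · rw [if_pos hh, if_pos hh, pvToNat_ofNat _ (by omega)]

    · rw [if_neg hh, if_neg hh]
  · rw [if_neg hlet, if_neg hlet]
    by_cases hh : w.toList.length / 2 ≤ i
    · rw [if_pos hh, if_pos hh]
    · rw [if_neg hh, if_neg hh, Char.ofNat_toNat]
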